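-- pv_equiv track=rewrite | github.com/popellab/qsp-hpc-tools | qsp_hpc/batch/hpc_job_manager.py | _format_array_spec
-- ===== SOURCE A (Python) =====
-- from typing import Callable, Dict, List, Optional, Tuple, TypeVar, Union
--
-- def _format_array_spec(task_ids: List[int]) -> str:
--     """Collapse a task-id list into a SLURM ``--array=...`` spec.
--
--     Consecutive runs collapse to ``N1-N2`` form — SLURM accepts both
--     ``7,15,22,23,24,25,41`` and ``7,15,22-25,41``, but the collapsed
--     form keeps the submit line (and ``squeue`` output) readable when
--     the drop set is large. Single ids and runs of length 2 stay as
--     comma-separated entries.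
--
--     Raises:
--         ValueError: If ``task_ids`` is empty — SLURM rejects an empty
--             ``--array=``, so callers should avoid submitting in that
--             case rather than rely on us producing a placeholder.
--     """
--     if not task_ids:
--         raise ValueError("Cannot build --array spec from empty task id list")
--     ids = sorted(set(task_ids))
--     runs: List[str] = []
--     start = prev = ids[0]
--
--     def flush() -> None:
--         if prev == start:
--             runs.append(str(start))
--         elif prev == start + 1:
--             # Length-2 runs stay comma-separated; the range form "N-N+1"
--             # is the same character count but harder to eyeball.
--             runs.append(f"{start},{prev}")
--         else:
--             runs.append(f"{start}-{prev}")
--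
--     for tid in ids[1:]:
--         if tid == prev + 1:
--             prev = tid
--         else:
--             flush()
--             start = prev = tid
--     flush()
--     return ",".join(runs)
-- ===== SOURCE B (Python) =====
-- from typing import List
--
--
-- def _format_array_spec(task_ids: List[int]) -> str:
--     if not task_ids:
--         raise ValueError("Cannot build --array spec from empty task id list")
--     s = set(task_ids)
--     # Run boundaries by set membership: x starts a run iff x-1 is absent,
--     # x ends a run iff x+1 is absent; sorted starts pair up with sorted ends.
--     starts = sorted(x for x in s if x - 1 not in s)
--     ends = sorted(x for x in s if x + 1 not in s)
--     pieces: List[str] = []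
--     for a, b in zip(starts, ends):
--         if a == b:
--             pieces.append(str(a))
--         elif b == a + 1:
--             pieces.append(f"{a},{b}")
--         else:
--             pieces.append(f"{a}-{b}")
--     return ",".join(pieces)
-- ===== Notes on version B (the rewrite author's own statement) =====
-- stated objective: alternative
-- what changed: Replaces A's sequential start/prev run-tracking scan (with a nested flush() closure) by set-membership boundary detection: x starts a run iff x-1 is not in the set and ends one iff x+1 is not, so the spec is built by zipping the sorted start list with the sorted end list, with no sequential comparison of neighbours at all.
-- outside the precondition, e.g. on _format_array_spec([]): A raises ValueError, B raises ValueError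
import Mathlib
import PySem

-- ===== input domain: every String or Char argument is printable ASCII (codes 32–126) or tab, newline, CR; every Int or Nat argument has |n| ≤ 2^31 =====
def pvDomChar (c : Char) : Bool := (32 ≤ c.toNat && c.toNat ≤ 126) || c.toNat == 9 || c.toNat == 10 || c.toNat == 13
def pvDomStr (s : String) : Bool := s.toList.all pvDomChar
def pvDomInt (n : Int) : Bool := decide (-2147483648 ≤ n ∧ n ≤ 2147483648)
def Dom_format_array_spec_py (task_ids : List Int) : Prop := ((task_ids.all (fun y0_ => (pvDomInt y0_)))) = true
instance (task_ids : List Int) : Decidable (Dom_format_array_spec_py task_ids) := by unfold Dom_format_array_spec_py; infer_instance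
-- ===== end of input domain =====

-- B replaces A's sequential start/prev run-tracking scan by set-membership boundary
-- detection (x starts a run iff x-1 ∉ set, ends one iff x+1 ∉ set; sorted starts zip
-- with sorted ends).  Objective: alternative.  Pre_ excludes [] where A raises ValueError.

-- ===== PORT A =====
-- A's nested flush(): reads start/prev of the current run.
def pvFlushA (start prev : Int) : String :=
  if prev = start then PySem.Int.toStr start
  else if prev = start + 1 then PySem.Int.toStr start ++ "," ++ PySem.Int.toStr prev
  else PySem.Int.toStr start ++ "-" ++ PySem.Int.toStr prev

-- A's "for tid in ids[1:]" loop over state (start, prev, runs), then the final flush.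
def pvLoopA (xs : List Int) (start prev : Int) (runs : List String) : List String :=
  match xs with
  | [] => runs ++ [pvFlushA start prev]
  | tid :: rest =>
      if tid = prev + 1 then pvLoopA rest start tid runs
      else pvLoopA rest tid tid (runs ++ [pvFlushA start prev])

def format_array_spec_py (task_ids : List Int) : String :=
  if task_ids = [] then ""   -- raise ValueError: excluded by Pre_
  else
    match PySem.List.sorted (PySem.Set.ofList task_ids) (fun x => x) false with
    | [] => ""               -- unreachable: sorted(set(..)) of a nonempty list is nonempty
    | x :: rest => PySem.Str.join "," (pvLoopA rest x x [])

-- ===== PORT B =====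
-- the loop body over one zipped (a, b) pair
def pvPieceB (a b : Int) : String :=
  if a = b then PySem.Int.toStr a
  else if b = a + 1 then PySem.Int.toStr a ++ "," ++ PySem.Int.toStr b
  else PySem.Int.toStr a ++ "-" ++ PySem.Int.toStr b

def format_array_spec_py_alt (task_ids : List Int) : String :=
  if task_ids = [] then ""   -- raise ValueError: excluded by Pre_
  else
    let s := PySem.Set.ofList task_ids
    let starts := PySem.List.sorted (s.filter (fun x => !(PySem.Set.contains s (x - 1)))) (fun x => x) false
    let ends := PySem.List.sorted (s.filter (fun x => !(PySem.Set.contains s (x + 1)))) (fun x => x) false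
    PySem.Str.join "," (List.zipWith (fun a b => pvPieceB a b) starts ends)

-- ===== PRECONDITION & SPEC =====
-- A raises ValueError exactly on the empty list.
def Pre_format_array_spec_py (task_ids : List Int) : Prop := task_ids ≠ []
instance (task_ids : List Int) : Decidable (Pre_format_array_spec_py task_ids) := by
  unfold Pre_format_array_spec_py; infer_instance

def pvWitness_format_array_spec_py : List Int := [7, 15, 22, 23, 24, 25, 41]

def Spec_format_array_spec_py (task_ids : List Int) (out : String) : Prop := out = format_array_spec_py_alt task_ids
instance (task_ids : List Int) (out : String) : Decidable (Spec_format_array_spec_py task_ids out) := by unfold Spec_format_array_spec_py; infer_instance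

-- ===== CLAIM (what is proved, stated in full; the proofs are below) =====
def Claim_equal_format_array_spec_py : Prop := ∀ (task_ids : List Int), Dom_format_array_spec_py task_ids → Pre_format_array_spec_py task_ids → Spec_format_array_spec_py task_ids (format_array_spec_py task_ids)

-- ===== LEMMAS AND PROOFS =====

-- canonical run decomposition of a strictly increasing list, as (start, end) pairs
def pvGo (xs : List Int) (s p : Int) : List (Int × Int) :=
  match xs with
  | [] => [(s, p)]
  | y :: ys => if y = p + 1 then pvGo ys s y else (s, p) :: pvGo ys y y

lemma pvFlushA_eq_piece (a b : Int) : pvFlushA a b = pvPieceB a b := by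
  unfold pvFlushA pvPieceB
  by_cases h : a = b
  · simp [h]
  · rw [if_neg (fun hh => h hh.symm), if_neg h]

lemma pvLoopA_eq_go (xs : List Int) : ∀ (s p : Int) (runs : List String),
    pvLoopA xs s p runs = runs ++ (pvGo xs s p).map (fun r => pvFlushA r.1 r.2) := by
  induction xs with
  | nil => intro s p runs; simp [pvLoopA, pvGo]
  | cons y ys ih =>
    intro s p runs
    by_cases h : y = p + 1 <;> simp [pvLoopA, pvGo, h, ih]

lemma pvMemPredIff (ids pre : List Int) (p y : Int) (ys : List Int)
    (hs : ids.Pairwise (· < ·)) (h : ids = pre ++ p :: y :: ys) :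
    ((y - 1) ∈ ids) ↔ y = p + 1 := by
  subst h
  rw [List.pairwise_append] at hs
  obtain ⟨-, hcons, hcross⟩ := hs
  rw [List.pairwise_cons] at hcons
  obtain ⟨hp, hcons2⟩ := hcons
  rw [List.pairwise_cons] at hcons2
  obtain ⟨hy, -⟩ := hcons2
  have hpy : p < y := hp y (by simp)
  constructor
  · intro hm
    simp only [List.mem_append, List.mem_cons] at hm
    rcases hm with hm | hm | hm | hm
    · have := hcross _ hm p (by simp); omega
    · omega
    · omega
    · have := hy _ hm; omega
  · intro he; simp [he]

lemma pvMemSuccIff (ids pre : List Int) (p : Int) (xs : List Int)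
    (hs : ids.Pairwise (· < ·)) (h : ids = pre ++ p :: xs) :
    ((p + 1) ∈ ids) ↔ xs.head? = some (p + 1) := by
  subst h
  rw [List.pairwise_append] at hs
  obtain ⟨-, hcons, hcross⟩ := hs
  rw [List.pairwise_cons] at hcons
  obtain ⟨hp, hxs⟩ := hcons
  constructor
  · intro hm
    simp only [List.mem_append, List.mem_cons] at hm
    rcases hm with hm | hm | hm
    · have := hcross _ hm p (by simp); omega
    · omega
    · cases xs with
      | nil => simp at hm
      | cons y ys =>
        rw [List.pairwise_cons] at hxs
        obtain ⟨hyys, -⟩ := hxs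
        have hpy : p < y := hp y (by simp)
        rcases List.mem_cons.mp hm with hm | hm
        · simp [hm]
        · have := hyys _ hm; omega
  · intro he
    cases xs with
    | nil => simp at he
    | cons y ys => simp at he; simp [he]

lemma pvHeadPredNotMem (x : Int) (rest : List Int)
    (hs : (x :: rest).Pairwise (· < ·)) : ((x - 1) ∈ x :: rest) = False := by
  rw [List.pairwise_cons] at hs
  obtain ⟨hx, -⟩ := hs
  simp only [List.mem_cons, eq_iff_iff, iff_false]
  intro hm
  rcases hm with hm | hm
  · omega
  · have := hx _ hm; omega

lemma pvGo_fst (ids : List Int) (hs : ids.Pairwise (· < ·)) (xs : List Int) :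
    ∀ (s p : Int) (pre : List Int), ids = pre ++ p :: xs →
    (pvGo xs s p).map Prod.fst = s :: xs.filter (fun y => !decide ((y - 1) ∈ ids)) := by
  induction xs with
  | nil => intro s p pre h; simp [pvGo]
  | cons y ys ih =>
    intro s p pre h
    have hmem := pvMemPredIff ids pre p y ys hs h
    by_cases hy : y = p + 1
    · have h2 : ids = (pre ++ [p]) ++ y :: ys := by simp [h]
      simp only [pvGo, if_pos hy, List.filter_cons]
      rw [ih s y (pre ++ [p]) h2]
      have : ((y - 1) ∈ ids) := hmem.mpr hy
      simp [this]
    · have h2 : ids = (pre ++ [p]) ++ y :: ys := by simp [h]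
      simp only [pvGo, if_neg hy, List.map_cons, List.filter_cons]
      rw [ih y y (pre ++ [p]) h2]
      have : ¬ ((y - 1) ∈ ids) := fun hh => hy (hmem.mp hh)
      simp [this]

lemma pvGo_snd (ids : List Int) (hs : ids.Pairwise (· < ·)) (xs : List Int) :
    ∀ (s p : Int) (pre : List Int), ids = pre ++ p :: xs →
    (pvGo xs s p).map Prod.snd = (p :: xs).filter (fun y => !decide ((y + 1) ∈ ids)) := by
  induction xs with
  | nil =>
    intro s p pre h
    have hmem := pvMemSuccIff ids pre p [] hs h
    have : ¬ ((p + 1) ∈ ids) := by rw [hmem]; simp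
    simp [pvGo, this]
  | cons y ys ih =>
    intro s p pre h
    have hmem := pvMemSuccIff ids pre p (y :: ys) hs h
    have h2 : ids = (pre ++ [p]) ++ y :: ys := by simp [h]
    by_cases hy : y = p + 1
    · have hin : ((p + 1) ∈ ids) := by rw [hmem]; simp [hy]
      simp only [pvGo, if_pos hy, List.filter_cons]
      rw [ih s y (pre ++ [p]) h2]
      simp only [List.filter_cons]
      by_cases hc : (y + 1) ∈ ids <;> simp [hin, hc]
    · have hout : ¬ ((p + 1) ∈ ids) := by
        rw [hmem]; simp; omega
      simp only [pvGo, if_neg hy, List.map_cons, List.filter_cons]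
      rw [ih y y (pre ++ [p]) h2]
      simp only [List.filter_cons]
      by_cases hc : (y + 1) ∈ ids <;> simp [hout, hc]

lemma pvZipWith_fst_snd {α β γ : Type} (f : α → β → γ) (l : List (α × β)) :
    List.zipWith f (l.map Prod.fst) (l.map Prod.snd) = l.map (fun r => f r.1 r.2) := by
  induction l with
  | nil => rfl
  | cons a t ih => simp [ih]

-- sorted(filter over the set) = filter over sorted(set)
lemma pvSortedFilter (task_ids : List Int) (p : Int → Bool) :
    PySem.List.sorted ((PySem.Set.ofList task_ids).filter p) (fun x => x) false
      = (PySem.List.sorted (PySem.Set.ofList task_ids) (fun x => x) false).filter p := by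
  apply PySem.List.sorted_eq_of_perm_of_pairwise_lt
  · exact (PySem.List.sorted_perm _ _ _).filter p
  · exact (PySem.List.sorted_ofList_pairwise_lt _).filter _

-- ===== VERDICT (by name: the statement is the Claim_ definition above) =====
theorem format_array_spec_py_spec : Claim_equal_format_array_spec_py := by
  intro task_ids _ hpre
  unfold Spec_format_array_spec_py format_array_spec_py format_array_spec_py_alt
  rw [if_neg hpre, if_neg hpre]
  cases h : PySem.List.sorted (PySem.Set.ofList task_ids) (fun x => x) false with
  | nil =>
    exfalso
    rw [PySem.List.sorted_eq_nil_iff] at h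
    cases task_ids with
    | nil => exact hpre rfl
    | cons a l =>
      have ha : a ∈ PySem.Set.ofList (a :: l) := by
        rw [PySem.Set.mem_ofList]; exact List.mem_cons_self
      rw [h] at ha
      exact absurd ha (List.not_mem_nil)
  | cons x rest =>
    have hs : (x :: rest).Pairwise (· < ·) := by
      rw [← h]; exact PySem.List.sorted_ofList_pairwise_lt _
    -- the two filters over the set, rewritten to filters over the sorted list
    have hstart :
        PySem.List.sorted ((PySem.Set.ofList task_ids).filter
            (fun z => !(PySem.Set.contains (PySem.Set.ofList task_ids) (z - 1)))) (fun x => x) false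
          = (x :: rest).filter (fun y => !decide ((y - 1) ∈ x :: rest)) := by
      rw [show ((PySem.Set.ofList task_ids).filter
            (fun z => !(PySem.Set.contains (PySem.Set.ofList task_ids) (z - 1))))
          = ((PySem.Set.ofList task_ids).filter (fun z => !decide ((z - 1) ∈ x :: rest))) from
        List.filter_congr (by
          intro z _
          have : ((z - 1) ∈ PySem.Set.ofList task_ids) ↔ ((z - 1) ∈ x :: rest) := by
            rw [← h, PySem.List.mem_sorted]
          simp [PySem.Set.contains, this])]
      rw [pvSortedFilter, h]
    have hend :
        PySem.List.sorted ((PySem.Set.ofList task_ids).filter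
            (fun z => !(PySem.Set.contains (PySem.Set.ofList task_ids) (z + 1)))) (fun x => x) false
          = (x :: rest).filter (fun y => !decide ((y + 1) ∈ x :: rest)) := by
      rw [show ((PySem.Set.ofList task_ids).filter
            (fun z => !(PySem.Set.contains (PySem.Set.ofList task_ids) (z + 1))))
          = ((PySem.Set.ofList task_ids).filter (fun z => !decide ((z + 1) ∈ x :: rest))) from
        List.filter_congr (by
          intro z _
          have : ((z + 1) ∈ PySem.Set.ofList task_ids) ↔ ((z + 1) ∈ x :: rest) := by
            rw [← h, PySem.List.mem_sorted]
          simp [PySem.Set.contains, this])]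
      rw [pvSortedFilter, h]
    show PySem.Str.join "," (pvLoopA rest x x []) = PySem.Str.join "," (List.zipWith _ _ _)
    rw [hstart, hend]
    have hfst := pvGo_fst (x :: rest) hs rest x x [] rfl
    have hsnd := pvGo_snd (x :: rest) hs rest x x [] rfl
    have hhead : ((x - 1) ∈ x :: rest) = False := pvHeadPredNotMem x rest hs
    have hstart2 : (x :: rest).filter (fun y => !decide ((y - 1) ∈ x :: rest))
        = List.map Prod.fst (pvGo rest x x) := by
      rw [hfst, List.filter_cons]; simp [hhead]
    rw [hstart2, ← hsnd, pvZipWith_fst_snd, pvLoopA_eq_go]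
    simp [pvFlushA_eq_piece]
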